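-- pv_equiv track=rewrite | github.com/shedskin/shedskin | examples/kanoodle.py | matrixact
-- ===== SOURCE A (Python) =====
-- def matrixact(m, v):
--     u = [0,0]
--     for i in range(2):
--         sum = 0
--         for j in range(2):
--             sum += m[i][j]*v[j]
--         u[i] = sum
--     return u
-- ===== SOURCE B (Python) =====
-- def matrixact(m, v):
--     # Column-wise: accumulate the linear combination v[j] * (j-th column of m).
--     u = [0, 0]
--     for x, col in zip(v, list(zip(m[0], m[1]))[:2]):
--         u = [a + x * c for a, c in zip(u, col)]
--     return u
-- ===== Notes on version B (the rewrite author's own statement) =====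
-- stated objective: alternative
-- what changed: B computes the product column-wise: it transposes the matrix and accumulates the linear combination v[0]*col0 + v[1]*col1 of whole columns, replacing A's row-wise dot-product loops with a mutable accumulator list.
import Mathlib
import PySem

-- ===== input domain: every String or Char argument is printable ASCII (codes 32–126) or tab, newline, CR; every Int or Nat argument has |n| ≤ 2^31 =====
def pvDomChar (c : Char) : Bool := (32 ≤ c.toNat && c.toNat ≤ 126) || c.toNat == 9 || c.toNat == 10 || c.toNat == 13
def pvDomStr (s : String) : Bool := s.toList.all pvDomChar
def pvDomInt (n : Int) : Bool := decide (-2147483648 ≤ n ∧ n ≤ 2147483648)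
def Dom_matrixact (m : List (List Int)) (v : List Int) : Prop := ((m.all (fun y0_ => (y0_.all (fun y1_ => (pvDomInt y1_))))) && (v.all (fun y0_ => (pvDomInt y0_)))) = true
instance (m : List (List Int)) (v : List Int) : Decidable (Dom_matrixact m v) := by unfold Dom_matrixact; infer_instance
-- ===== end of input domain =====

-- B computes the product column-wise (transpose, then accumulate v[j]-scaled columns) instead of A's row-wise dot products (objective: alternative).

-- ===== PORT A =====
-- Literal port of A: u = [0,0]; for i in range(2): sum = 0; for j in range(2): sum += m[i][j]*v[j]; u[i] = sum.
-- Out-of-range indexing (Python IndexError) is mapped to a default via .getD; Pre_ excludes those inputs.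
def matrixact (m : List (List Int)) (v : List Int) : List Int :=
  (PySem.List.pyRange 0 2 1).foldl (fun u i =>
    let sum := (PySem.List.pyRange 0 2 1).foldl (fun s j =>
      s + ((PySem.List.pyGet? ((PySem.List.pyGet? m i).getD []) j).getD 0) * ((PySem.List.pyGet? v j).getD 0)) 0
    u.set i.toNat sum) [0, 0]

-- ===== PORT B =====
-- Literal port of B: cols = zip(m[0], m[1]) (transpose) truncated to 2 columns; then u is updated
-- by adding x*col elementwise for each (x, col) in zip(v, cols). m[0]/m[1] raise IndexError in
-- Python when m has < 2 rows (outside Pre_); the port maps that to a default via .getD.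
def matrixact_alt (m : List (List Int)) (v : List Int) : List Int :=
  let cols := (((PySem.List.pyGet? m 0).getD []).zip ((PySem.List.pyGet? m 1).getD [])).take 2
  (v.zip cols).foldl (fun u xc =>
    List.zipWith (fun a c => a + xc.1 * c) u [xc.2.1, xc.2.2]) [0, 0]

-- ===== PRECONDITION & SPEC =====
-- Pre_ excludes exactly the inputs where Python A raises IndexError: fewer than 2 rows of m,
-- fewer than 2 entries in row 0 or row 1, or fewer than 2 entries in v.
def Pre_matrixact (m : List (List Int)) (v : List Int) : Prop :=
  2 ≤ m.length ∧ 2 ≤ (m.getD 0 []).length ∧ 2 ≤ (m.getD 1 []).length ∧ 2 ≤ v.length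
instance (m : List (List Int)) (v : List Int) : Decidable (Pre_matrixact m v) := by unfold Pre_matrixact; infer_instance

def pvWitness_matrixact : List (List Int) × List Int := ([[1, 2], [3, 4]], [5, 6])

def Spec_matrixact (m : List (List Int)) (v : List Int) (out : List Int) : Prop := out = matrixact_alt m v
instance (m : List (List Int)) (v : List Int) (out : List Int) : Decidable (Spec_matrixact m v out) := by unfold Spec_matrixact; infer_instance

-- ===== CLAIM (what is proved, stated in full; the proofs are below) =====
def Claim_equal_matrixact : Prop := ∀ (m : List (List Int)) (v : List Int), Dom_matrixact m v → Pre_matrixact m v → Spec_matrixact m v (matrixact m v)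

-- ===== LEMMAS AND PROOFS =====

-- ===== VERDICT (by name: the statement is the Claim_ definition above) =====
theorem matrixact_spec : Claim_equal_matrixact := by
  intro m v _ hpre
  obtain ⟨h1, h2, h3, h4⟩ := hpre
  rcases m with _ | ⟨r0, m'⟩; · simp at h1
  rcases m' with _ | ⟨r1, mr⟩; · simp at h1
  rcases r0 with _ | ⟨a, r0'⟩; · simp at h2
  rcases r0' with _ | ⟨b, _⟩; · simp at h2
  rcases r1 with _ | ⟨c, r1'⟩; · simp at h3
  rcases r1' with _ | ⟨d, _⟩; · simp at h3
  rcases v with _ | ⟨x, v'⟩; · simp at h4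
  rcases v' with _ | ⟨y, _⟩; · simp at h4
  have haux : ∀ n : ℕ, (0:ℤ) ≤ (n:ℤ) + 1 := fun n => by positivity
  simp [Spec_matrixact, matrixact, matrixact_alt, PySem.List.pyRange, PySem.List.pyGet?,
    PySem.List.pyIdx?, haux, List.range_succ]
  constructor <;> ring
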